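-- pv_equiv track=rewrite | github.com/Miyarima/python-spellchecker | src/trie.py | _suggestions_compare
-- ===== SOURCE A (Python) =====
-- def _suggestions_compare(sugg, word_str):
--     if len(sugg) == len(word_str) and sugg[-1] == word_str[-1]:
--         wrong_counter = 0
--         for i, letter in enumerate(sugg):
--             if letter != word_str[i]:
--                 wrong_counter += 1
--             elif letter == word_str[i] and wrong_counter < 2:
--                 wrong_counter = 0
--         if wrong_counter < 2:
--             return True
--     return False
-- ===== SOURCE B (Python) =====
-- def _suggestions_compare(sugg, word_str):
--     # Guard preserved: unequal lengths or differing last characters -> False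
--     # (sugg[-1] still raises IndexError on two empty strings, like the original).
--     if len(sugg) != len(word_str) or sugg[-1] != word_str[-1]:
--         return False
--     mism = [a != b for a, b in zip(sugg, word_str)]
--     return not any(x and y for x, y in zip(mism, mism[1:]))
-- ===== Notes on version B (the rewrite author's own statement) =====
-- stated objective: simpler
-- what changed: Replaces the stateful reset-counter loop by a stateless pipeline: a mismatch mask via zip, then 'no two adjacent mismatches' checked by zipping the mask with its own tail.
import Mathlib
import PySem

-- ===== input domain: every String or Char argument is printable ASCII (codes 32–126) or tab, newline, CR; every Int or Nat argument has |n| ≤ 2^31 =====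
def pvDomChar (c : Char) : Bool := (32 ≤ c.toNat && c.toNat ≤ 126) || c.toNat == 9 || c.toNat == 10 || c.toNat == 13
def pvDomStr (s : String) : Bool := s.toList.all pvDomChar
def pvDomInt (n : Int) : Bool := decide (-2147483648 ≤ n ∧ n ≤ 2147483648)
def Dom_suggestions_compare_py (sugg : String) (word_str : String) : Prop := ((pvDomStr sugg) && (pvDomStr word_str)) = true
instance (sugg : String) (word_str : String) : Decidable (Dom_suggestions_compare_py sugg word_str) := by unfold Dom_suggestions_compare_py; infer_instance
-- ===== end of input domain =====

-- B replaces A's stateful reset-counter loop by a stateless mismatch-mask pipeline (simpler, same cost).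

-- ===== PORT A =====
def suggestions_compare_py (sugg : String) (word_str : String) : Bool :=
  if sugg.toList.length = word_str.toList.length ∧
     PySem.Str.pyGet? sugg (-1) = PySem.Str.pyGet? word_str (-1) then
    let wc : Int := (PySem.List.enumerate sugg.toList 0).foldl
      (fun wc p =>
        if some p.2 ≠ PySem.Str.pyGet? word_str p.1 then wc + 1
        else if some p.2 = PySem.Str.pyGet? word_str p.1 ∧ wc < 2 then 0
        else wc) 0
    if wc < 2 then true else false
  else false

-- ===== PORT B =====
def suggestions_compare_py_alt (sugg : String) (word_str : String) : Bool :=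
  if sugg.toList.length ≠ word_str.toList.length ∨
     PySem.Str.pyGet? sugg (-1) ≠ PySem.Str.pyGet? word_str (-1) then false
  else
    let mism := List.zipWith (fun a b => decide (a ≠ b)) sugg.toList word_str.toList
    !((mism.zip (mism.drop 1)).any (fun p => p.1 && p.2))

-- ===== PRECONDITION & SPEC =====
-- Pre_ excludes only the pair of empty strings, on which A (and B) raise IndexError at sugg[-1].
def Pre_suggestions_compare_py (sugg : String) (word_str : String) : Prop :=
  ¬ (sugg = "" ∧ word_str = "")
instance (sugg : String) (word_str : String) : Decidable (Pre_suggestions_compare_py sugg word_str) := by unfold Pre_suggestions_compare_py; infer_instance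

def pvWitness_suggestions_compare_py : String × String := ("cat", "cot")

def Spec_suggestions_compare_py (sugg : String) (word_str : String) (out : Bool) : Prop := out = suggestions_compare_py_alt sugg word_str
instance (sugg : String) (word_str : String) (out : Bool) : Decidable (Spec_suggestions_compare_py sugg word_str out) := by unfold Spec_suggestions_compare_py; infer_instance

-- ===== CLAIM (what is proved, stated in full; the proofs are below) =====
def Claim_equal_suggestions_compare_py : Prop := ∀ (sugg : String) (word_str : String), Dom_suggestions_compare_py sugg word_str → Pre_suggestions_compare_py sugg word_str → Spec_suggestions_compare_py sugg word_str (suggestions_compare_py sugg word_str)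

-- ===== LEMMAS AND PROOFS =====

-- A's counter loop, over the boolean mismatch mask.
def pvWcFold : Int → List Bool → Int
  | wc, [] => wc
  | wc, m :: ms => pvWcFold (if m then wc + 1 else if wc < 2 then 0 else wc) ms

-- "no two adjacent trues", carrying whether the previous entry was true
def pvOk : Bool → List Bool → Bool
  | _, [] => true
  | b, m :: ms => if b && m then false else pvOk m ms

theorem pvWcFold_ge_two : ∀ (ms : List Bool) (wc : Int), 2 ≤ wc → 2 ≤ pvWcFold wc ms := by
  intro ms
  induction ms with
  | nil => intro wc h; exact h
  | cons m ms ih =>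
    intro wc h
    simp only [pvWcFold]
    apply ih
    split_ifs <;> omega

theorem pvWcFold_lt_two : ∀ (ms : List Bool) (wc : Int), (wc = 0 ∨ wc = 1) →
    decide (pvWcFold wc ms < 2) = pvOk (wc == 1) ms := by
  intro ms
  induction ms with
  | nil => intro wc h; simp only [pvWcFold, pvOk]; rcases h with h | h <;> simp [h]
  | cons m ms ih =>
    intro wc h
    simp only [pvWcFold, pvOk]
    cases m with
    | false =>
      have hlt : wc < 2 := by omega
      have h0 := ih 0 (Or.inl rfl)
      simp only [Bool.and_false, Bool.false_eq_true, if_false, if_pos hlt]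
      simpa using h0
    | true =>
      rcases h with h | h
      · subst h
        simpa using ih 1 (Or.inr rfl)
      · subst h
        have h2 := pvWcFold_ge_two ms 2 (le_refl 2)
        simp only [show (1:Int) + 1 = 2 from by norm_num]
        simp
        omega

theorem pvOk_eq_zip : ∀ (ms : List Bool) (b : Bool),
    pvOk b ms = !(((b :: ms).zip ms).any (fun p => p.1 && p.2)) := by
  intro ms
  induction ms with
  | nil => intro b; simp [pvOk]
  | cons m ms ih =>
    intro b
    simp only [pvOk, List.zip_cons_cons, List.any_cons]
    cases hbm : b && m
    · simp [ih m]
    · simp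

-- A's enumerate-and-index loop equals the counter loop over the mismatch mask.
theorem pvEnumFold_eq_wcFold : ∀ (xs ys : List Char) (k : Nat) (wc : Int),
    k + xs.length ≤ ys.length →
    (PySem.List.enumerate xs (k : Int)).foldl
      (fun wc p =>
        if some p.2 ≠ PySem.List.pyGet? ys p.1 then wc + 1
        else if some p.2 = PySem.List.pyGet? ys p.1 ∧ wc < 2 then 0
        else wc) wc
    = pvWcFold wc (List.zipWith (fun a b => decide (a ≠ b)) xs (ys.drop k)) := by
  intro xs
  induction xs with
  | nil => intro ys k wc h; simp [PySem.List.enumerate_nil, pvWcFold]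
  | cons x xs ih =>
    intro ys k wc h
    have hk : k < ys.length := by simp at h; omega
    have hdrop : ys.drop k = ys[k] :: ys.drop (k + 1) := (List.getElem_cons_drop hk).symm
    rw [PySem.List.enumerate_cons, hdrop]
    simp only [List.zipWith_cons_cons, List.foldl_cons, pvWcFold]
    rw [PySem.List.pyGet?_natCast]
    have hget : ys[(k : Nat)]? = some ys[k] := List.getElem?_eq_getElem hk
    rw [hget]
    have hcast : ((k : Int) + 1) = ((k + 1 : Nat) : Int) := by push_cast; ring
    rw [hcast, ih ys (k + 1) _ (by simp at h ⊢; omega)]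
    by_cases hx : x = ys[k]
    · simp [hx]
    · simp [hx]

-- core equality on the mask, starting state wc = 0
theorem pvCore (ms : List Bool) :
    decide (pvWcFold 0 ms < 2) = !((ms.zip (ms.drop 1)).any (fun p => p.1 && p.2)) := by
  cases ms with
  | nil => simp [pvWcFold]
  | cons m ms =>
    have h1 := pvWcFold_lt_two (m :: ms) 0 (Or.inl rfl)
    have h2 : pvOk (false) (m :: ms) = pvOk m ms := by simp [pvOk]
    rw [h1]
    simp only [show ((0:Int) == 1) = false by decide, h2, pvOk_eq_zip ms m]
    simp

-- ===== VERDICT (by name: the statement is the Claim_ definition above) =====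
theorem suggestions_compare_py_spec : Claim_equal_suggestions_compare_py := by
  intro sugg word_str _hdom _hpre
  unfold Spec_suggestions_compare_py suggestions_compare_py suggestions_compare_py_alt
  by_cases hg : sugg.toList.length = word_str.toList.length ∧
      PySem.Str.pyGet? sugg (-1) = PySem.Str.pyGet? word_str (-1)
  · have hne : ¬ (sugg.toList.length ≠ word_str.toList.length ∨
        PySem.Str.pyGet? sugg (-1) ≠ PySem.Str.pyGet? word_str (-1)) := by
      simp only [not_or, not_not]
      exact hg
    rw [if_pos hg, if_neg hne]
    have hfold : (PySem.List.enumerate sugg.toList 0).foldl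
        (fun wc p =>
          if some p.2 ≠ PySem.Str.pyGet? word_str p.1 then wc + 1
          else if some p.2 = PySem.Str.pyGet? word_str p.1 ∧ wc < 2 then 0
          else wc) 0
        = pvWcFold 0 (List.zipWith (fun a b => decide (a ≠ b)) sugg.toList word_str.toList) := by
      have h := pvEnumFold_eq_wcFold sugg.toList word_str.toList 0 0 (by omega)
      rw [Int.natCast_zero] at h
      simp only [List.drop_zero] at h
      exact h
    dsimp only
    rw [hfold, ← pvCore (List.zipWith (fun a b => decide (a ≠ b)) sugg.toList word_str.toList)]
    split <;> simp_all
  · rw [if_neg hg, if_pos (by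
      by_cases h : sugg.toList.length = word_str.toList.length
      · exact Or.inr (fun hc => hg ⟨h, hc⟩)
      · exact Or.inl h)]
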